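-- pv_equiv track=rewrite | github.com/YeJiangnan1029/leetcode_helper | code/leetcode_2306.py | distinctNames
-- ===== SOURCE A (Python) =====
-- from collections import defaultdict
-- from typing import List
--
-- def distinctNames(ideas: List[str]) -> int:
--     # class trie_node:
--     #     def __init__(self) -> None:
--     #         self.edge = dict()
--     #         self.is_end = False
--
--     # trie = trie_node()
--     # first_freq = defaultdict(int)
--     # n_words = len(ideas)
--     # for idea in ideas:
--     #     cur_node = trie
--     #     for i in range(len(idea)):
--     #         t = idea[len(idea)-i-1]
--     #         if t not in cur_node.edge:
--     #             cur_node.edge[t] = trie_node()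
--     #         cur_node = cur_node.edge[t]
--     #         if i == len(idea)-1:
--     #             cur_node.is_end = True
--     #             first_freq[t] +=  1
--     # self.ret_ans = 0
--     # def getans(trie):
--     #     cur_son = []
--     #     acc_fre = 0
--     #     for e in trie.edge:
--     #         getans(trie.edge[e])
--     #         if trie.edge[e].is_end:
--     #             cur_son.append(e)
--     #             acc_fre += first_freq[e]
--     #     if len(cur_son) > 1:
--     #         self.ret_ans += len(cur_son) * (n_words-acc_fre)
--     #     elif len(cur_son) == 1:
--     #         self.ret_ans += n_words-acc_fre
--     # getans(trie)
--     # return self.ret_ans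
--
--     # 哈希方法
--     ret = 0
--     suffix_freq = defaultdict(set)
--     first_freq = defaultdict(int)
--     for idea in ideas:
--         first = idea[:1]
--         suffix = idea[1:]
--         suffix_freq[first].add(suffix)
--
--     keys = list(suffix_freq.keys())
--     for k1 in range(len(keys)):
--         for k2 in range(k1+1, len(suffix_freq.keys())):
--             set1 = suffix_freq[keys[k1]]
--             set2 = suffix_freq[keys[k2]]
--             n_1 = len(set1 - set2)
--             n_2 = len(set2 - set1)
--             ret += n_1 * n_2
--     return ret*2
-- ===== SOURCE B (Python) =====
-- def distinctNames(ideas):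
--     # Dedup first letters (in first-appearance order), no dict of sets kept:
--     # each letter's suffix set is rebuilt by a filtering comprehension, and the
--     # per-pair counts use |s|-|s&t| inclusion-exclusion instead of set differences.
--     firsts = []
--     for idea in ideas:
--         f = idea[:1]
--         if f not in firsts:
--             firsts.append(f)
--
--     def suffixes(f):
--         return {idea[1:] for idea in ideas if idea[:1] == f}
--
--     total = 0
--     rest = firsts
--     while rest:
--         a, rest = rest[0], rest[1:]
--         sa = suffixes(a)
--         for b in rest:
--             sb = suffixes(b)
--             c = len(sa & sb)
--             total += (len(sa) - c) * (len(sb) - c)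
--     return 2 * total
-- ===== Notes on version B (the rewrite author's own statement) =====
-- stated objective: alternative
-- what changed: B keeps no dict of suffix sets at all: it dedups the first letters into a list, rebuilds each letter's suffix set by a filtering set-comprehension during a structural head/tail pair scan, and counts each pair via one intersection with inclusion-exclusion (|s|-|s&t|)*(|t|-|s&t|) instead of two set differences over index loops.
import Mathlib
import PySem

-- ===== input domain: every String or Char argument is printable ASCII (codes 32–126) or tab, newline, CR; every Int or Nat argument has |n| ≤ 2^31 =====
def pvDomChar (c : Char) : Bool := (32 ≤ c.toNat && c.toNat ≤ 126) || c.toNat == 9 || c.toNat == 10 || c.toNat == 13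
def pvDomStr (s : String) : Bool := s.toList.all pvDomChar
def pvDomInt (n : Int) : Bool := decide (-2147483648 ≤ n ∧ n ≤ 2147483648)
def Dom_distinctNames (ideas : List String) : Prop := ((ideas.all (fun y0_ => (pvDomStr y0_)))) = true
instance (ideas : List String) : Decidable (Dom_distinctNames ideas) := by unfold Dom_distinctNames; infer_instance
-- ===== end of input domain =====

-- B replaces A's suffix-set dict and index loops by a dedup list of first letters, a structural
-- head/tail pair scan that refilters each letter's suffix set, and inclusion-exclusion counting;
-- alternative decomposition, not claimed faster.

-- ===== PORT A =====
def distinctNames (ideas : List String) : Int :=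
  let sf : PySem.Dict String (PySem.Set String) :=
    ideas.foldl (fun d idea =>
      d.modify (PySem.Str.slice idea none (some 1)) PySem.Set.empty
        (fun s => PySem.Set.add s (PySem.Str.slice idea (some 1) none)))
      PySem.Dict.empty
  let keys := sf.keys
  let ret : Int :=
    (PySem.List.pyRange 0 (PySem.List.len keys)).foldl (fun ret k1 =>
      (PySem.List.pyRange (k1 + 1) (PySem.List.len sf.keys)).foldl (fun ret k2 =>
        let set1 := sf.getD (PySem.List.pyGetD keys k1 "") PySem.Set.empty
        let set2 := sf.getD (PySem.List.pyGetD keys k2 "") PySem.Set.empty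
        let n1 := PySem.Set.len (PySem.Set.diff set1 set2)
        let n2 := PySem.Set.len (PySem.Set.diff set2 set1)
        ret + n1 * n2) ret) 0
  ret * 2

-- ===== PORT B =====
-- {idea[1:] for idea in ideas if idea[:1] == f}
def pvSuffixes (ideas : List String) (f : String) : PySem.Set String :=
  PySem.Set.ofList ((ideas.filter (fun idea => PySem.Str.slice idea none (some 1) == f)).map
    (fun idea => PySem.Str.slice idea (some 1) none))

-- the 'while rest: a, rest = rest[0], rest[1:] …' loop of Source B, structurally on rest
def pvPairLoop (ideas : List String) (total : Int) : List String → Int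
  | [] => total
  | a :: rest =>
    let sa := pvSuffixes ideas a
    pvPairLoop ideas
      (rest.foldl (fun t b =>
        let sb := pvSuffixes ideas b
        let c := PySem.Set.len (PySem.Set.inter sa sb)
        t + (PySem.Set.len sa - c) * (PySem.Set.len sb - c)) total)
      rest

def distinctNames_alt (ideas : List String) : Int :=
  let firsts : List String := ideas.foldl (fun acc idea =>
      let f := PySem.Str.slice idea none (some 1)
      if f ∈ acc then acc else acc ++ [f]) []
  2 * pvPairLoop ideas 0 firsts

-- ===== PRECONDITION & SPEC =====
def Spec_distinctNames (ideas : List String) (out : Int) : Prop := out = distinctNames_alt ideas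
instance (ideas : List String) (out : Int) : Decidable (Spec_distinctNames ideas out) := by unfold Spec_distinctNames; infer_instance

-- ===== CLAIM (what is proved, stated in full; the proofs are below) =====
def Claim_equal_distinctNames : Prop := ∀ (ideas : List String), Dom_distinctNames ideas → Spec_distinctNames ideas (distinctNames ideas)

-- ===== LEMMAS AND PROOFS =====

-- B's per-pair contribution, as a function of the two first letters
def pvG (ideas : List String) (a b : String) : Int :=
  let sa := pvSuffixes ideas a
  let sb := pvSuffixes ideas b
  let c := PySem.Set.len (PySem.Set.inter sa sb)
  (PySem.Set.len sa - c) * (PySem.Set.len sb - c)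

-- reference shape shared by both proofs: accumulate f over all ordered pairs (head, later)
def pvPairRec (f : String → String → Int) : Int → List String → Int
  | total, [] => total
  | total, a :: rest => pvPairRec f (rest.foldl (fun t b => t + f a b) total) rest

-- A's grouping dict, looked up at any key, is B's refiltered suffix set.
theorem pv_getD_group (l : List String) (d : PySem.Dict String (PySem.Set String)) (c : String) :
    (l.foldl (fun d idea =>
        d.modify (PySem.Str.slice idea none (some 1)) PySem.Set.empty
          (fun s => PySem.Set.add s (PySem.Str.slice idea (some 1) none))) d).getD c PySem.Set.empty
      = (l.filter (fun idea => PySem.Str.slice idea none (some 1) == c)).foldl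
          (fun s idea => PySem.Set.add s (PySem.Str.slice idea (some 1) none))
          (d.getD c PySem.Set.empty) := by
  induction l generalizing d with
  | nil => simp
  | cons x t ih =>
      simp only [List.foldl_cons, List.filter_cons]
      rw [ih]
      by_cases h : PySem.Str.slice x none (some 1) = c
      · simp [h]
      · have h' : (PySem.Str.slice x none (some 1) == c) = false := by simp [h]
        rw [h']
        simp only [Bool.false_eq_true, if_false]
        rw [PySem.Dict.getD_modify]
        have hne : ¬ (c = PySem.Str.slice x none (some 1)) := fun hc => h hc.symm
        simp [hne]

theorem pv_sf_getD (ideas : List String) (c : String) :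
    ((ideas.foldl (fun d idea =>
        d.modify (PySem.Str.slice idea none (some 1)) PySem.Set.empty
          (fun s => PySem.Set.add s (PySem.Str.slice idea (some 1) none))) PySem.Dict.empty).getD
        c PySem.Set.empty)
      = pvSuffixes ideas c := by
  rw [pv_getD_group]
  simp only [PySem.Dict.getD_empty, pvSuffixes, PySem.Set.ofList_eq_foldl, List.foldl_map]
  rfl

-- A's dict keys are B's dedup list of first letters.
theorem pv_keys_eq (ideas : List String) :
    ((ideas.foldl (fun d idea =>
        d.modify (PySem.Str.slice idea none (some 1)) PySem.Set.empty
          (fun s => PySem.Set.add s (PySem.Str.slice idea (some 1) none))) PySem.Dict.empty).keys)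
      = ideas.foldl (fun acc idea =>
          let f := PySem.Str.slice idea none (some 1)
          if f ∈ acc then acc else acc ++ [f]) [] := by
  rw [PySem.Dict.keys_foldl_modify_key ideas
        (fun idea => PySem.Str.slice idea none (some 1)) PySem.Set.empty
        (fun _ idea => fun s => PySem.Set.add s (PySem.Str.slice idea (some 1) none))]
  simp only [PySem.Dict.keys_empty]
  show (ideas.map (fun idea => PySem.Str.slice idea none (some 1))).foldl PySem.Set.add [] = _
  rw [List.foldl_map]
  apply PySem.List.foldl_congr_mem
  intro acc x _
  by_cases h : PySem.Str.slice x none (some 1) ∈ acc <;>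
    simp [PySem.Set.add, PySem.Set.contains, h]

-- inclusion-exclusion on a set: |s - t| = |s| - |s ∩ t|
theorem pv_len_diff (s t : PySem.Set String) :
    PySem.Set.len (PySem.Set.diff s t) = PySem.Set.len s - PySem.Set.len (PySem.Set.inter s t) := by
  simp only [PySem.Set.len, PySem.Set.diff, PySem.Set.inter]
  have h := List.length_eq_length_filter_add (l := s) (fun x => PySem.Set.contains t x)
  omega

-- |s ∩ t| = |t ∩ s| on nodup sets
theorem pv_len_inter_comm (s t : PySem.Set String) (hs : s.Nodup) (ht : t.Nodup) :
    PySem.Set.len (PySem.Set.inter s t) = PySem.Set.len (PySem.Set.inter t s) := by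
  simp only [PySem.Set.len, PySem.Set.inter, Int.natCast_inj]
  apply List.Perm.length_eq
  rw [List.perm_ext_iff_of_nodup (hs.filter _) (ht.filter _)]
  intro a
  simp only [List.mem_filter, PySem.Set.contains, List.contains_iff_mem]
  exact and_comm

-- A's per-pair contribution (two set differences) equals B's (inclusion-exclusion)
theorem pv_term_eq (ideas : List String) (a b : String) :
    PySem.Set.len (PySem.Set.diff (pvSuffixes ideas a) (pvSuffixes ideas b)) *
      PySem.Set.len (PySem.Set.diff (pvSuffixes ideas b) (pvSuffixes ideas a))
      = pvG ideas a b := by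
  have hna : (pvSuffixes ideas a).Nodup := PySem.Set.nodup_ofList _
  have hnb : (pvSuffixes ideas b).Nodup := PySem.Set.nodup_ofList _
  rw [pv_len_diff, pv_len_diff, pv_len_inter_comm _ _ hnb hna]
  rfl

-- the Nat-indexed double loop over index pairs equals the structural pair recursion
theorem pv_index_pairs (f : String → String → Int) :
    ∀ (K : List String) (total : Int),
    (List.range K.length).foldl (fun r i =>
        ((K.drop (i + 1)).foldl (fun r b => r + f (K.getD i "") b) r)) total
      = pvPairRec f total K := by
  intro K
  induction K with
  | nil => intro total; rfl
  | cons a T ih =>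
      intro total
      rw [List.length_cons, List.range_succ_eq_map, List.foldl_cons, List.foldl_map]
      simp only [List.drop_succ_cons, List.drop_zero, List.getD_cons_zero, List.getD_cons_succ,
        Nat.succ_eq_add_one]
      rw [ih]
      rfl

-- B's while-loop is the pair recursion over pvG
theorem pv_pairLoop_eq (ideas : List String) :
    ∀ (K : List String) (total : Int),
    pvPairLoop ideas total K = pvPairRec (pvG ideas) total K := by
  intro K
  induction K with
  | nil => intro total; rfl
  | cons a T ih =>
      intro total
      simp only [pvPairLoop, pvPairRec, pvG]
      rw [ih]

-- A's double index loop over any key list K equals the pair recursion over pvG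
theorem pv_A_loop (ideas K : List String) :
    (PySem.List.pyRange 0 (PySem.List.len K)).foldl (fun ret k1 =>
      (PySem.List.pyRange (k1 + 1) (PySem.List.len K)).foldl (fun ret k2 =>
        ret +
          PySem.Set.len (PySem.Set.diff (pvSuffixes ideas (PySem.List.pyGetD K k1 ""))
              (pvSuffixes ideas (PySem.List.pyGetD K k2 ""))) *
          PySem.Set.len (PySem.Set.diff (pvSuffixes ideas (PySem.List.pyGetD K k2 ""))
              (pvSuffixes ideas (PySem.List.pyGetD K k1 "")))) ret) 0
      = pvPairRec (pvG ideas) 0 K := by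
  rw [show PySem.List.len K = ((K.length : Nat) : Int) from rfl,
    PySem.List.pyRange_zero_natCast, List.foldl_map, ← pv_index_pairs]
  apply PySem.List.foldl_congr_mem
  intro r i _
  rw [show ((i : Nat) : Int) + 1 = (((i + 1 : Nat) : Nat) : Int) by push_cast; ring,
    show ((K.length : Nat) : Int) = PySem.List.len K from rfl,
    PySem.List.foldl_pyRange_pyGetD K ""
      (fun acc b => acc +
        PySem.Set.len (PySem.Set.diff (pvSuffixes ideas (PySem.List.pyGetD K (((i : Nat) : Int)) ""))
            (pvSuffixes ideas b)) *
        PySem.Set.len (PySem.Set.diff (pvSuffixes ideas b)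
            (pvSuffixes ideas (PySem.List.pyGetD K (((i : Nat) : Int)) "")))) r
      (by exact_mod_cast Int.natCast_nonneg _)]
  simp only [Int.toNat_natCast, PySem.List.pyGetD_natCast]
  apply PySem.List.foldl_congr_mem
  intro acc b _
  rw [pv_term_eq]

-- ===== VERDICT (by name: the statement is the Claim_ definition above) =====
theorem distinctNames_spec : Claim_equal_distinctNames := by
  intro ideas _
  show distinctNames ideas = distinctNames_alt ideas
  simp only [distinctNames, distinctNames_alt, pv_keys_eq, pv_sf_getD]
  rw [pv_A_loop, pv_pairLoop_eq, Int.mul_comm]
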